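-- pv_equiv track=rewrite | github.com/ManhCaoMoreh/getp-precourse | Precourse2/Problem2/main.py | build_level_cols
-- ===== SOURCE A (Python) =====
-- def build_level_cols(root, level, margin, lefts, rights, level_cols):
--     num_node = 1
--     root_col = margin + 1
--
--     if root in lefts:
--         left_num_node = build_level_cols(
--             lefts[root], level + 1, margin, lefts, rights, level_cols
--         )
--         root_col = left_num_node + margin + 1
--         num_node += left_num_node
--
--     if level not in level_cols:
--         level_cols[level] = []
--
--     level_cols[level].append(root_col)
--
--     if root in rights:
--         right_num_node = build_level_cols(
--             rights[root], level + 1, root_col, lefts, rights, level_cols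
--         )
--         num_node += right_num_node
--
--     return num_node
-- ===== SOURCE B (Python) =====
-- def build_level_cols(root, level, margin, lefts, rights, level_cols):
--     # Iterative in-order traversal with an explicit stack and a running
--     # in-order counter: each visited node's column is margin + 1 + idx.
--     stack = [(root, level, False)]
--     idx = 0
--     while stack:
--         node, lvl, visit = stack.pop()
--         if visit:
--             level_cols.setdefault(lvl, []).append(margin + 1 + idx)
--             idx += 1
--         else:
--             if node in rights:
--                 stack.append((rights[node], lvl + 1, False))
--             stack.append((node, lvl, True))
--             if node in lefts:
--                 stack.append((lefts[node], lvl + 1, False))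
--     return idx
-- ===== Notes on version B (the rewrite author's own statement) =====
-- stated objective: alternative
-- what changed: Replaces the size-accumulating recursion (which threads margins through nested recursive calls) by a single iterative in-order traversal with an explicit stack and one running in-order counter, using the identity column = margin + 1 + in-order index; same return value (node count) and same level_cols mutation.
import Mathlib
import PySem

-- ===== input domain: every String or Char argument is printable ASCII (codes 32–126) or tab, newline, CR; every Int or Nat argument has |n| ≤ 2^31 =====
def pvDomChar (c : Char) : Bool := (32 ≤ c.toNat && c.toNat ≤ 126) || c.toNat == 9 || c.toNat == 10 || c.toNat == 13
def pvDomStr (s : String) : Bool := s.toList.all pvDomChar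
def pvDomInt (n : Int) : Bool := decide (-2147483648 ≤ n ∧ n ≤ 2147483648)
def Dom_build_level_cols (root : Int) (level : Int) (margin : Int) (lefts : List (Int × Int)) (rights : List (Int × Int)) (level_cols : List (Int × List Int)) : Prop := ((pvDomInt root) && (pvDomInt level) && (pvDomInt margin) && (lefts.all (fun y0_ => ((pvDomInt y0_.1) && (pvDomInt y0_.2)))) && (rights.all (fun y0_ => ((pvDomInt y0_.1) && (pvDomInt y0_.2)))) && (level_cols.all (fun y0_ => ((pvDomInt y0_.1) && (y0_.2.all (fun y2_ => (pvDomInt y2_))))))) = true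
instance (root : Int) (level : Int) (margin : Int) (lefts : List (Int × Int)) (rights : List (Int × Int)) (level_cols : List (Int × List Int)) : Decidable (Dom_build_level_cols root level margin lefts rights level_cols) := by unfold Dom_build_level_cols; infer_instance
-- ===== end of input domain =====

-- B replaces A's size-accumulating recursion by an iterative in-order traversal with an
-- explicit stack and a running in-order counter (column = margin + 1 + in-order index);
-- objective: alternative decomposition, same return value and same level_cols mutation.
-- Both versions mutate level_cols in Python; the equivalence proved here is about the
-- RETURN value (the node count). Fuel arguments in the ports only make the same
-- recursion total; Pre_ guarantees they never run out.

-- ===== PORT A =====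
def goA (lefts rights : PySem.Dict Int Int) : Nat → Int → Int → Int → PySem.Dict Int (List Int) → Int × PySem.Dict Int (List Int)
  | 0, _, _, _, lc => (0, lc)
  | fuel+1, root, level, margin, lc =>
    let t : Int × Int × PySem.Dict Int (List Int) :=
      match lefts.get? root with
      | some l =>
        let p := goA lefts rights fuel l (level + 1) margin lc
        (1 + p.1, p.1 + margin + 1, p.2)
      | none => (1, margin + 1, lc)
    let num_node := t.1
    let root_col := t.2.1
    let lc1 := t.2.2
    let lc2 := if lc1.contains level then lc1 else lc1.insert level []
    let lc3 := lc2.modify level [] (fun xs => xs ++ [root_col])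
    match rights.get? root with
    | some r =>
      let q := goA lefts rights fuel r (level + 1) root_col lc3
      (num_node + q.1, q.2)
    | none => (num_node, lc3)

def build_level_cols (root : Int) (level : Int) (margin : Int) (lefts : List (Int × Int)) (rights : List (Int × Int)) (level_cols : List (Int × List Int)) : Int :=
  (goA (.mk lefts) (.mk rights) (lefts.length + rights.length + 1) root level margin (.mk level_cols)).1

-- ===== PORT B =====
def goB (lefts rights : PySem.Dict Int Int) (margin : Int) : Nat → List (Int × Int × Bool) → Int → PySem.Dict Int (List Int) → Option (Int × PySem.Dict Int (List Int))
  | 0, _, _, _ => none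
  | fuel+1, stack, idx, lc =>
    match stack with
    | [] => some (idx, lc)
    | (node, lvl, visit) :: rest =>
      if visit then
        goB lefts rights margin fuel rest (idx + 1)
          ((lc.setdefault lvl []).modify lvl [] (fun xs => xs ++ [margin + 1 + idx]))
      else
        let s1 := match rights.get? node with
          | some r => (r, lvl + 1, false) :: rest
          | none => rest
        let s2 := (node, lvl, true) :: s1
        let s3 := match lefts.get? node with
          | some l => (l, lvl + 1, false) :: s2
          | none => s2
        goB lefts rights margin fuel s3 idx lc

def build_level_cols_alt (root : Int) (level : Int) (margin : Int) (lefts : List (Int × Int)) (rights : List (Int × Int)) (level_cols : List (Int × List Int)) : Int :=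
  ((goB (.mk lefts) (.mk rights) margin (2 ^ (lefts.length + rights.length + 2)) [(root, level, false)] 0 (.mk level_cols)).map Prod.fst).getD 0

-- ===== PRECONDITION & SPEC =====
-- child pointers of x under the two dicts (first-match lookup, as the ports use)
def pvKids (lefts rights : List (Int × Int)) (x : Int) : List Int :=
  ((PySem.Dict.mk lefts).get? x).toList ++ ((PySem.Dict.mk rights).get? x).toList

-- pvEx n x = "some chain of n child steps starts at x"
def pvEx (lefts rights : List (Int × Int)) : Nat → Int → Bool
  | 0, _ => true
  | n+1, x => (pvKids lefts rights x).any (fun c => pvEx lefts rights n c)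

-- Pre_ excludes exactly the inputs on which Python A does not return: a chain of more than
-- |lefts|+|rights| child steps from root forces a repeated key, i.e. a reachable cycle, on
-- which A's recursion is infinite (RecursionError); on every other input A returns.
def Pre_build_level_cols (root : Int) (level : Int) (margin : Int) (lefts : List (Int × Int)) (rights : List (Int × Int)) (level_cols : List (Int × List Int)) : Prop :=
  pvEx lefts rights (lefts.length + rights.length + 1) root = false
instance (root : Int) (level : Int) (margin : Int) (lefts : List (Int × Int)) (rights : List (Int × Int)) (level_cols : List (Int × List Int)) : Decidable (Pre_build_level_cols root level margin lefts rights level_cols) := by unfold Pre_build_level_cols; infer_instance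

def pvWitness_build_level_cols : Int × Int × Int × (List (Int × Int)) × (List (Int × Int)) × (List (Int × List Int)) :=
  (1, 0, 0, [(1, 2)], [(1, 3)], [])

def Spec_build_level_cols (root : Int) (level : Int) (margin : Int) (lefts : List (Int × Int)) (rights : List (Int × Int)) (level_cols : List (Int × List Int)) (out : Int) : Prop := out = build_level_cols_alt root level margin lefts rights level_cols
instance (root : Int) (level : Int) (margin : Int) (lefts : List (Int × Int)) (rights : List (Int × Int)) (level_cols : List (Int × List Int)) (out : Int) : Decidable (Spec_build_level_cols root level margin lefts rights level_cols out) := by unfold Spec_build_level_cols; infer_instance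

-- ===== CLAIM (what is proved, stated in full; the proofs are below) =====
def Claim_equal_build_level_cols : Prop := ∀ (root : Int) (level : Int) (margin : Int) (lefts : List (Int × Int)) (rights : List (Int × Int)) (level_cols : List (Int × List Int)), Dom_build_level_cols root level margin lefts rights level_cols → Pre_build_level_cols root level margin lefts rights level_cols → Spec_build_level_cols root level margin lefts rights level_cols (build_level_cols root level margin lefts rights level_cols)

-- ===== LEMMAS AND PROOFS =====

-- Main invariant, by induction on the depth budget n: where no chain of n steps starts at x,
-- A's recursion from x computes a size s (independent of fuel ≥ n, level, margin and the
-- level_cols accumulator), s ≤ 2^n - 1, and B's stack loop consumes the frame (x, lvl, false)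
-- in exactly 2*s fuel, adding s to the counter.
theorem pv_main (le ri : List (Int × Int)) :
    ∀ (n : Nat) (x : Int), pvEx le ri n x = false →
    ∃ s : Nat,
      1 ≤ s ∧ s ≤ 2 ^ n - 1 ∧
      (∀ (f : Nat) (lv mg : Int) (lcA : PySem.Dict Int (List Int)), n ≤ f →
        (goA (.mk le) (.mk ri) f x lv mg lcA).1 = (s : Int)) ∧
      (∀ (mgB lvl : Int) (rest : List (Int × Int × Bool)) (idx : Int) (lc : PySem.Dict Int (List Int)),
        ∃ lc', ∀ g : Nat,
          goB (.mk le) (.mk ri) mgB (g + 2 * s) ((x, lvl, false) :: rest) idx lc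
            = goB (.mk le) (.mk ri) mgB g rest (idx + (s : Int)) lc') := by
  intro n
  induction n with
  | zero => intro x hx; simp [pvEx] at hx
  | succ n ih =>
    intro x hx
    have h2 : 2 ^ (n + 1) = 2 * 2 ^ n := by ring
    have h3 : 1 ≤ 2 ^ n := Nat.one_le_two_pow
    cases hl : (PySem.Dict.mk le).get? x <;> cases hr : (PySem.Dict.mk ri).get? x
    · -- no children
      simp only [pvEx, pvKids, hl, hr] at hx
      refine ⟨1, le_refl _, by omega, ?_, ?_⟩
      · intro f lv mg lcA hf
        cases f with
        | zero => omega
        | succ f' => simp [goA, hl, hr]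
      · intro mgB lvl rest idx lc
        refine ⟨(lc.setdefault lvl []).modify lvl [] (fun xs => xs ++ [mgB + 1 + idx]), ?_⟩
        intro g
        have hfuel : g + 2 * 1 = (g + 1) + 1 := by omega
        rw [hfuel]
        simp only [goB, hl, hr, reduceIte, Bool.false_eq_true, if_false]
        norm_num
    · -- right child only
      rename_i r
      simp only [pvEx, pvKids, hl, hr] at hx
      simp only [Option.toList, List.nil_append, List.any_cons, List.any_nil,
        Bool.or_eq_false_iff] at hx
      obtain ⟨sr, hr1, hrb, hAr, hBr⟩ := ih r hx.1
      refine ⟨1 + sr, by omega, by omega, ?_, ?_⟩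
      · intro f lv mg lcA hf
        cases f with
        | zero => omega
        | succ f' =>
          simp only [goA, hl, hr]
          rw [hAr f' _ _ _ (by omega)]
          push_cast; ring
      · intro mgB lvl rest idx lc
        obtain ⟨lc₃, hb2⟩ := hBr mgB (lvl + 1) rest (idx + 1)
          ((lc.setdefault lvl []).modify lvl [] (fun xs => xs ++ [mgB + 1 + idx]))
        refine ⟨lc₃, ?_⟩
        intro g
        have hfuel : g + 2 * (1 + sr) = ((g + 2 * sr) + 1) + 1 := by omega
        rw [hfuel]
        simp only [goB, hl, hr, reduceIte, Bool.false_eq_true, if_false]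
        rw [show idx + ((1 + sr : Nat) : Int) = idx + 1 + (sr : Int) by push_cast; ring]
        rw [hb2 g]
    · -- left child only
      rename_i l
      simp only [pvEx, pvKids, hl, hr] at hx
      simp only [Option.toList, List.append_nil, List.any_cons, List.any_nil,
        Bool.or_eq_false_iff] at hx
      obtain ⟨sl, hl1, hlb, hAl, hBl⟩ := ih l hx.1
      refine ⟨1 + sl, by omega, by omega, ?_, ?_⟩
      · intro f lv mg lcA hf
        cases f with
        | zero => omega
        | succ f' =>
          simp only [goA, hl, hr]
          rw [hAl f' _ _ _ (by omega)]
          push_cast; ring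
      · intro mgB lvl rest idx lc
        obtain ⟨lc₁, hb1⟩ := hBl mgB (lvl + 1) ((x, lvl, true) :: rest) idx lc
        refine ⟨(lc₁.setdefault lvl []).modify lvl [] (fun xs => xs ++ [mgB + 1 + (idx + (sl : Int))]), ?_⟩
        intro g
        have hfuel : g + 2 * (1 + sl) = ((g + 1) + 2 * sl) + 1 := by omega
        rw [hfuel]
        simp only [goB, hl, hr, Bool.false_eq_true, if_false]
        rw [show idx + ((1 + sl : Nat) : Int) = idx + (sl : Int) + 1 by push_cast; ring]
        rw [hb1 (g + 1)]
        simp only [goB, reduceIte]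
    · -- both children
      rename_i l r
      simp only [pvEx, pvKids, hl, hr] at hx
      simp only [Option.toList, List.cons_append, List.nil_append, List.any_cons, List.any_nil,
        Bool.or_eq_false_iff] at hx
      obtain ⟨sl, hl1, hlb, hAl, hBl⟩ := ih l hx.1
      obtain ⟨sr, hr1, hrb, hAr, hBr⟩ := ih r hx.2.1
      refine ⟨1 + sl + sr, by omega, by omega, ?_, ?_⟩
      · intro f lv mg lcA hf
        cases f with
        | zero => omega
        | succ f' =>
          simp only [goA, hl, hr]
          rw [hAl f' _ _ _ (by omega), hAr f' _ _ _ (by omega)]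
          push_cast; ring
      · intro mgB lvl rest idx lc
        obtain ⟨lc₁, hb1⟩ := hBl mgB (lvl + 1) ((x, lvl, true) :: (r, lvl + 1, false) :: rest) idx lc
        obtain ⟨lc₃, hb2⟩ := hBr mgB (lvl + 1) rest (idx + (sl : Int) + 1)
          ((lc₁.setdefault lvl []).modify lvl [] (fun xs => xs ++ [mgB + 1 + (idx + (sl : Int))]))
        refine ⟨lc₃, ?_⟩
        intro g
        have hfuel : g + 2 * (1 + sl + sr) = (((g + 2 * sr + 1) + 2 * sl)) + 1 := by omega
        rw [hfuel]
        simp only [goB, hl, hr, Bool.false_eq_true, if_false]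
        rw [show idx + ((1 + sl + sr : Nat) : Int) = idx + (sl : Int) + 1 + (sr : Int) by push_cast; ring]
        rw [hb1 (g + 2 * sr + 1)]
        simp only [goB, reduceIte]
        rw [hb2 g]

-- ===== VERDICT (by name: the statement is the Claim_ definition above) =====
theorem build_level_cols_spec : Claim_equal_build_level_cols := by
  intro root level margin le ri lc _hDom hPre
  unfold Spec_build_level_cols
  obtain ⟨s, hs1, hsb, hA, hB⟩ := pv_main le ri (le.length + ri.length + 1) root hPre
  unfold build_level_cols build_level_cols_alt
  rw [hA (le.length + ri.length + 1) level margin _ (Nat.le_refl _)]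
  obtain ⟨lc', hb⟩ := hB margin level [] 0 (.mk lc)
  have hpow : 2 * s + 1 ≤ 2 ^ (le.length + ri.length + 2) := by
    have h2 : 2 ^ (le.length + ri.length + 2) = 2 * 2 ^ (le.length + ri.length + 1) := by ring
    have h3 : 1 ≤ 2 ^ (le.length + ri.length + 1) := Nat.one_le_two_pow
    omega
  have hg : 2 ^ (le.length + ri.length + 2) = (2 ^ (le.length + ri.length + 2) - 2 * s - 1 + 1) + 2 * s := by omega
  rw [hg, hb (2 ^ (le.length + ri.length + 2) - 2 * s - 1 + 1)]
  simp [goB]
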